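-- pv_equiv track=rewrite | github.com/babint/AoC-2020 | 09/part2.py | find_invalid_numbers
-- ===== SOURCE A (Python) =====
-- def has_sum_match(num_check, nums):
-- 	found = False
-- 	for i, num1 in enumerate(nums):
-- 		if (found == True): break
-- 		for j, num2 in enumerate(nums):
-- 			if (i == j): break # don't attempt to sum itself
-- 			if (found == True): break # don't attempt if we are done
-- 			if ((num1 + num2) == num_check): found = True # Match Check
-- 	return found
--
-- def find_invalid_numbers(preamble, numbers):
-- 	invalid_number = -1
-- 	numbers_size = len(numbers)
-- 	for i in range(0,numbers_size):
-- 		num = numbers.pop(0) # grab number sum match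
-- 		if not (has_sum_match(num, preamble)):
-- 			invalid_number = num
-- 			break
--
-- 		# Move number to preamble, keeping same size
-- 		preamble.pop(0)
-- 		preamble.append(num)
--
-- 	return invalid_number
-- ===== SOURCE B (Python) =====
-- def find_invalid_numbers(preamble, numbers):
-- 	# Hash-based two-sum: per window build a counter once, then check each
-- 	# value's complement in O(1), instead of scanning all pairs.
-- 	window = list(preamble)
-- 	for num in numbers:
-- 		counts = {}
-- 		for x in window:
-- 			counts[x] = counts.get(x, 0) + 1
-- 		if not any(num - x in counts and (num - x != x or counts[x] > 1) for x in counts):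
-- 			return num
-- 		del window[0]
-- 		window.append(num)
-- 	return -1
-- ===== Notes on version B (the rewrite author's own statement) =====
-- stated objective: faster
-- what changed: Replaced the O(w^2) nested-loop pair scan per window by a hash counter built once per window with an O(1) complement check per element, and B does not mutate its arguments (A pops from both lists).
import Mathlib
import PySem

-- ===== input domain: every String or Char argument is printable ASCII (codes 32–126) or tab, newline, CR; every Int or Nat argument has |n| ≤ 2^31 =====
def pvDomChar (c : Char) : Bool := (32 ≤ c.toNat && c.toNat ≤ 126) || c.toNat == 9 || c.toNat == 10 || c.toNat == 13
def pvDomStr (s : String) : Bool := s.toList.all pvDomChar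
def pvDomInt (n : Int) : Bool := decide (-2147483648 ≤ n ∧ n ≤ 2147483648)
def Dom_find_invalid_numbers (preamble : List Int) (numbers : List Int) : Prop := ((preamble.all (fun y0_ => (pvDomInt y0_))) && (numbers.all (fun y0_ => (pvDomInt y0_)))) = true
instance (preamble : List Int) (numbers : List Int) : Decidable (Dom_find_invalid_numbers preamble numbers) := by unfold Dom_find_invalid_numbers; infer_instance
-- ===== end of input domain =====

-- B replaces A's O(w^2) nested pair scan per window by a per-window hash counter with a
-- complement check; equivalence is about the RETURN value only (A pops from both argument
-- lists in place, B leaves them untouched).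

-- ===== PORT A =====
-- inner loop of has_sum_match: 'for j, num2 in enumerate(nums): if i==j: break; if found: break; …'
def pvInnerA (t i num1 : Int) (en : List (Int × Int)) (found : Bool) : Bool :=
  match en with
  | [] => found
  | (j, num2) :: tl =>
    if j = i then found
    else if found then found
    else pvInnerA t i num1 tl (if num1 + num2 = t then true else found)

-- outer loop of has_sum_match: 'for i, num1 in enumerate(nums): if found: break; …'
def pvOuterA (t : Int) (nums : List Int) (en : List (Int × Int)) (found : Bool) : Bool :=
  match en with
  | [] => found
  | (i, num1) :: tl =>
    if found then found
    else pvOuterA t nums tl (pvInnerA t i num1 (PySem.List.enumerate nums 0) found)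

def has_sum_match (t : Int) (nums : List Int) : Bool :=
  pvOuterA t nums (PySem.List.enumerate nums 0) false

-- main loop: 'for i in range(0, numbers_size): num = numbers.pop(0); …'; preamble.pop(0)
-- is only reached when has_sum_match succeeded, which forces preamble ≠ [], so tail is exact.
def pvLoopA (preamble : List Int) (numbers : List Int) : Int :=
  match numbers with
  | [] => -1
  | num :: rest =>
    if !(has_sum_match num preamble) then num
    else pvLoopA (preamble.tail ++ [num]) rest

def find_invalid_numbers (preamble : List Int) (numbers : List Int) : Int :=
  pvLoopA preamble numbers

-- ===== PORT B =====
-- 'any(num - x in counts and (num - x != x or counts[x] > 1) for x in counts)'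
def pvCheckB (num : Int) (counts : PySem.Dict Int Int) : Bool :=
  counts.keys.any (fun x =>
    counts.contains (num - x) && (decide (num - x ≠ x) || decide (counts.getD x 0 > 1)))

def pvLoopB (window : List Int) (numbers : List Int) : Int :=
  match numbers with
  | [] => -1
  | num :: rest =>
    let counts := window.foldl (fun d x => d.insert x (d.getD x 0 + 1)) PySem.Dict.empty
    if !(pvCheckB num counts) then num
    else pvLoopB (window.tail ++ [num]) rest

def find_invalid_numbers_alt (preamble : List Int) (numbers : List Int) : Int :=
  pvLoopB preamble numbers

-- ===== PRECONDITION & SPEC =====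
def Spec_find_invalid_numbers (preamble : List Int) (numbers : List Int) (out : Int) : Prop := out = find_invalid_numbers_alt preamble numbers
instance (preamble : List Int) (numbers : List Int) (out : Int) : Decidable (Spec_find_invalid_numbers preamble numbers out) := by unfold Spec_find_invalid_numbers; infer_instance

-- ===== CLAIM (what is proved, stated in full; the proofs are below) =====
def Claim_equal_find_invalid_numbers : Prop := ∀ (preamble : List Int) (numbers : List Int), Dom_find_invalid_numbers preamble numbers → Spec_find_invalid_numbers preamble numbers (find_invalid_numbers preamble numbers)

-- ===== LEMMAS AND PROOFS =====

-- The common meaning of one window check: some pair at distinct positions sums to t.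
def HasPair (t : Int) (ws : List Int) : Prop :=
  ∃ (i j : ℕ) (hi : i < ws.length) (hj : j < ws.length), j < i ∧ ws[i] + ws[j] = t

theorem pvInnerA_true (t i num1 : Int) (en : List (Int × Int)) :
    pvInnerA t i num1 en true = true := by
  induction en with
  | nil => rfl
  | cons p tl ih => obtain ⟨j, n2⟩ := p; simp [pvInnerA]

theorem pvInnerA_false (t i num1 : Int) (en : List (Int × Int)) :
    pvInnerA t i num1 en false
      = (en.takeWhile (fun p => p.1 != i)).any (fun p => num1 + p.2 == t) := by
  induction en with
  | nil => rfl
  | cons p tl ih =>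
    obtain ⟨j, n2⟩ := p
    by_cases hj : j = i
    · rw [List.takeWhile_cons_of_neg (by simp [hj])]
      simp [pvInnerA, hj]
    · rw [List.takeWhile_cons_of_pos (by simp [hj])]
      by_cases hm : num1 + n2 = t
      · simp [pvInnerA, hj, hm, pvInnerA_true]
      · simp [pvInnerA, hj, hm, ih]

theorem pvOuterA_true (t : Int) (nums : List Int) (en : List (Int × Int)) :
    pvOuterA t nums en true = true := by
  induction en with
  | nil => rfl
  | cons p tl ih => obtain ⟨i, n1⟩ := p; simp [pvOuterA]

theorem pvOuterA_false (t : Int) (nums : List Int) (en : List (Int × Int)) :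
    pvOuterA t nums en false
      = en.any (fun q =>
          ((PySem.List.enumerate nums 0).takeWhile (fun p => p.1 != q.1)).any
            (fun p => q.2 + p.2 == t)) := by
  induction en with
  | nil => rfl
  | cons q tl ih =>
    obtain ⟨i, n1⟩ := q
    simp only [pvOuterA, if_neg (by simp : ¬ (false = true)), List.any_cons]
    rw [pvInnerA_false]
    cases h : ((PySem.List.enumerate nums 0).takeWhile (fun p => p.1 != i)).any
        (fun p => n1 + p.2 == t) with
    | true => simp [pvOuterA_true]
    | false => simp [ih]

theorem takeWhile_enumerate_ne (c : Int) :
    ∀ (nums : List Int) (s : Int), s ≤ c →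
      (PySem.List.enumerate nums s).takeWhile (fun p => p.1 != c)
        = PySem.List.enumerate (nums.take (c - s).toNat) s := by
  intro nums
  induction nums with
  | nil => intro s _; simp [PySem.List.enumerate_nil]
  | cons x xs ih =>
    intro s hs
    rw [PySem.List.enumerate_cons]
    by_cases hsc : s = c
    · rw [List.takeWhile_cons_of_neg (by simp [hsc])]
      have h0 : (c - s).toNat = 0 := by omega
      rw [h0]
      simp [PySem.List.enumerate_nil]
    · rw [List.takeWhile_cons_of_pos (by simp [hsc])]
      have h1 : (c - s).toNat = (c - (s + 1)).toNat + 1 := by omega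
      rw [ih (s + 1) (by omega), h1]
      simp [PySem.List.enumerate_cons]

theorem mem_enumerate_iff (nums : List Int) (q : Int × Int) :
    ∀ s : Int, q ∈ PySem.List.enumerate nums s ↔
      ∃ (k : ℕ) (hk : k < nums.length), q = (s + k, nums[k]) := by
  induction nums with
  | nil => intro s; simp [PySem.List.enumerate_nil]
  | cons x xs ih =>
    intro s
    rw [PySem.List.enumerate_cons]
    constructor
    · intro h
      rcases List.mem_cons.mp h with h | h
      · exact ⟨0, by simp, by simpa using h⟩
      · obtain ⟨k, hk, hq⟩ := (ih (s + 1)).mp h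
        exact ⟨k + 1, by simpa using Nat.succ_lt_succ hk, by rw [hq]; simp; ring⟩
    · rintro ⟨k, hk, hq⟩
      cases k with
      | zero => exact List.mem_cons.mpr (Or.inl (by simpa using hq))
      | succ k =>
        refine List.mem_cons.mpr (Or.inr ((ih (s + 1)).mpr ⟨k, by simp only [List.length_cons] at hk; omega, ?_⟩))
        rw [hq]; simp; ring

theorem mem_enumerate_zero_iff (nums : List Int) (q : Int × Int) :
    q ∈ PySem.List.enumerate nums 0 ↔
      ∃ (k : ℕ) (hk : k < nums.length), q = ((k : Int), nums[k]) := by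
  rw [mem_enumerate_iff nums q 0]
  constructor
  · rintro ⟨k, hk, rfl⟩; exact ⟨k, hk, by simp⟩
  · rintro ⟨k, hk, rfl⟩; exact ⟨k, hk, by simp⟩

theorem has_sum_match_iff (t : Int) (ws : List Int) :
    has_sum_match t ws = true ↔ HasPair t ws := by
  unfold has_sum_match
  rw [pvOuterA_false, List.any_eq_true]
  constructor
  · rintro ⟨q, hq, hin⟩
    obtain ⟨i, hi, rfl⟩ := (mem_enumerate_zero_iff ws q).mp hq
    have hin' : ((PySem.List.enumerate ws 0).takeWhile (fun p => p.1 != (i : Int))).any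
        (fun p => ws[i] + p.2 == t) = true := hin
    rw [takeWhile_enumerate_ne _ ws 0 (by positivity)] at hin'
    have h0 : (((i : Int)) - 0).toNat = i := by omega
    rw [h0, List.any_eq_true] at hin'
    obtain ⟨p, hp, hsum⟩ := hin'
    obtain ⟨j, hj, rfl⟩ := (mem_enumerate_zero_iff _ p).mp hp
    have hji : j < i := by
      have := hj; simp only [List.length_take] at this; omega
    have hjlen : j < ws.length := by omega
    refine ⟨i, j, hi, hjlen, hji, ?_⟩
    have hg : (ws.take i)[j] = ws[j] := List.getElem_take
    simp only [hg] at hsum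
    simpa using hsum
  · rintro ⟨i, j, hi, hj, hji, hsum⟩
    refine ⟨((i : Int), ws[i]), (mem_enumerate_zero_iff ws _).mpr ⟨i, hi, rfl⟩, ?_⟩
    show ((PySem.List.enumerate ws 0).takeWhile (fun p => p.1 != (i : Int))).any
        (fun p => ws[i] + p.2 == t) = true
    rw [takeWhile_enumerate_ne _ ws 0 (by positivity)]
    have h0 : (((i : Int)) - 0).toNat = i := by omega
    rw [h0, List.any_eq_true]
    have hjt : j < (ws.take i).length := by simp only [List.length_take]; omega
    refine ⟨((j : Int), (ws.take i)[j]), (mem_enumerate_zero_iff _ _).mpr ⟨j, hjt, rfl⟩, ?_⟩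
    have hg : (ws.take i)[j] = ws[j] := List.getElem_take
    simp only [hg]
    simpa using hsum
-- two positions with the same value force count > 1
theorem count_gt_one_of_two_idx {ws : List Int} {x : Int} {i j : ℕ}
    (hi : i < ws.length) (hj : j < ws.length) (hji : j < i)
    (hxi : ws[i] = x) (hxj : ws[j] = x) : 1 < ws.count x := by
  have hsplit : ws = ws.take i ++ ws.drop i := (List.take_append_drop i ws).symm
  have hmem1 : x ∈ ws.take i := by
    have hlen : j < (ws.take i).length := by simp [List.length_take]; omega
    have : (ws.take i)[j] = x := by rw [List.getElem_take]; exact hxj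
    exact this ▸ List.getElem_mem hlen
  have hmem2 : x ∈ ws.drop i := by
    have hlen : 0 < (ws.drop i).length := by simp [List.length_drop]; omega
    have : (ws.drop i)[0] = x := by rw [List.getElem_drop]; simpa using hxi
    exact this ▸ List.getElem_mem hlen
  have h1 : 0 < (ws.take i).count x := List.count_pos_iff.mpr hmem1
  have h2 : 0 < (ws.drop i).count x := List.count_pos_iff.mpr hmem2
  calc 1 < (ws.take i).count x + (ws.drop i).count x := by omega
    _ = ws.count x := by rw [← List.count_append, ← hsplit]

theorem two_idx_of_count_gt_one {x : Int} :
    ∀ {ws : List Int}, 1 < ws.count x →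
      ∃ (i j : ℕ) (hi : i < ws.length) (hj : j < ws.length),
        j < i ∧ ws[i] = x ∧ ws[j] = x := by
  intro ws
  induction ws with
  | nil => intro h; simp at h
  | cons y tl ih =>
    intro h
    by_cases hy : y = x
    · subst hy
      rw [List.count_cons_self] at h
      have hpos : 0 < tl.count y := by omega
      obtain ⟨b, hb, hbx⟩ := List.mem_iff_getElem.mp (List.count_pos_iff.mp hpos)
      exact ⟨b + 1, 0, by simpa using Nat.succ_lt_succ hb, by simp,
        Nat.succ_pos b, by simpa using hbx, by simp⟩
    · rw [List.count_cons_of_ne hy] at h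
      have : 1 < tl.count x := h
      obtain ⟨i, j, hi, hj, hji, hxi, hxj⟩ := ih this
      exact ⟨i + 1, j + 1, by simpa using Nat.succ_lt_succ hi,
        by simpa using Nat.succ_lt_succ hj, by omega, by simpa using hxi,
        by simpa using hxj⟩

theorem pvCheckB_iff (t : Int) (ws : List Int) :
    pvCheckB t (ws.foldl (fun d x => d.insert x (d.getD x 0 + 1)) PySem.Dict.empty) = true
      ↔ HasPair t ws := by
  rw [PySem.Dict.foldl_insert_getD_add_one_eq_counter]
  unfold pvCheckB
  rw [List.any_eq_true]
  constructor
  · rintro ⟨x, hx, hcond⟩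
    rw [PySem.Dict.keys_counter] at hx
    have hxmem : x ∈ ws := (PySem.Set.mem_ofList _ _).mp hx
    simp only [Bool.and_eq_true, Bool.or_eq_true, decide_eq_true_eq] at hcond
    obtain ⟨hcont, hside⟩ := hcond
    have hcmem : (t - x) ∈ ws := by
      rw [PySem.Dict.contains_iff_mem_keys, PySem.Dict.keys_counter] at hcont
      exact (PySem.Set.mem_ofList _ _).mp hcont
    obtain ⟨a, ha, hax⟩ := List.mem_iff_getElem.mp hxmem
    obtain ⟨b, hb, hbx⟩ := List.mem_iff_getElem.mp hcmem
    rcases hside with hne | hcnt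
    · -- complement differs from x: the two indices are distinct
      have hab : a ≠ b := by
        intro h; subst h; rw [hax] at hbx; omega
      rcases Nat.lt_or_ge b a with hba | hab'
      · exact ⟨a, b, ha, hb, hba, by rw [hax, hbx]; ring⟩
      · have hlt : a < b := by omega
        exact ⟨b, a, hb, ha, hlt, by rw [hax, hbx]; ring⟩
    · -- t - x = x (otherwise the left disjunct holds); so t = 2x and count x > 1
      rw [PySem.Dict.getD_counter] at hcnt
      have hcnt' : 1 < ws.count x := by exact_mod_cast hcnt
      obtain ⟨i, j, hi, hj, hji, hxi, hxj⟩ := two_idx_of_count_gt_one hcnt'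
      by_cases htx : t - x = x
      · exact ⟨i, j, hi, hj, hji, by rw [hxi, hxj]; omega⟩
      · have hab : a ≠ b := by
          intro h; subst h; rw [hax] at hbx; exact htx (by omega)
        rcases Nat.lt_or_ge b a with hba | hab'
        · exact ⟨a, b, ha, hb, hba, by rw [hax, hbx]; ring⟩
        · exact ⟨b, a, hb, ha, by omega, by rw [hax, hbx]; ring⟩
  · rintro ⟨i, j, hi, hj, hji, hsum⟩
    set x := ws[i] with hx
    have hxmem : x ∈ ws := List.getElem_mem hi
    have hcmem : (t - x) ∈ ws := by
      have : ws[j] = t - x := by omega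
      exact this ▸ List.getElem_mem hj
    refine ⟨x, ?_, ?_⟩
    · rw [PySem.Dict.keys_counter]; exact (PySem.Set.mem_ofList _ _).mpr hxmem
    · simp only [Bool.and_eq_true, Bool.or_eq_true, decide_eq_true_eq]
      refine ⟨?_, ?_⟩
      · rw [PySem.Dict.contains_iff_mem_keys, PySem.Dict.keys_counter]
        exact (PySem.Set.mem_ofList _ _).mpr hcmem
      · by_cases htx : t - x = x
        · right
          rw [PySem.Dict.getD_counter]
          have : ws[j] = x := by omega
          have := count_gt_one_of_two_idx hi hj hji hx.symm this
          exact_mod_cast this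
        · exact Or.inl htx

theorem check_eq (t : Int) (ws : List Int) :
    has_sum_match t ws
      = pvCheckB t (ws.foldl (fun d x => d.insert x (d.getD x 0 + 1)) PySem.Dict.empty) := by
  rw [Bool.eq_iff_iff, has_sum_match_iff, pvCheckB_iff]

theorem loop_eq : ∀ (numbers window : List Int), pvLoopA window numbers = pvLoopB window numbers := by
  intro numbers
  induction numbers with
  | nil => intro window; rfl
  | cons num rest ih =>
    intro window
    show (if !(has_sum_match num window) then num else pvLoopA (window.tail ++ [num]) rest)
      = pvLoopB window (num :: rest)
    rw [check_eq num window]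
    show _ = (if !(pvCheckB num _) then num else pvLoopB (window.tail ++ [num]) rest)
    rw [ih]

-- ===== VERDICT (by name: the statement is the Claim_ definition above) =====
theorem find_invalid_numbers_spec : Claim_equal_find_invalid_numbers := by
  intro preamble numbers _
  unfold Spec_find_invalid_numbers find_invalid_numbers find_invalid_numbers_alt
  exact loop_eq numbers preamble
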